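-- pv_equiv track=rewrite | github.com/AvinashDoniparthi/TraceZero | severity_analyzer.py | _score_breach
-- ===== SOURCE A (Python) =====
-- DATA_WEIGHTS: dict[str, int] = {
--     # HIGH-impact data types
--     "Passwords": 30,
--     "Password hints": 20,
--     "Credit cards": 35,
--     "Bank account numbers": 35,
--     "Social security numbers": 35,
--     "Private messages": 25,
--     "Security questions and answers": 22,
--     "Auth tokens": 28,
--     # MEDIUM-impact data types
--     "Email addresses": 10,
--     "Phone numbers": 12,
--     "Usernames": 8,
--     "Names": 6,
--     "Dates of birth": 14,
--     "Physical addresses": 12,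
--     "IP addresses": 8,
--     # LOW-impact data types
--     "Geographic locations": 3,
--     "Genders": 2,
--     "Website activity": 4,
--     "Device information": 4,
--     "Employers": 2,
--     "Education levels": 2,
--     "Ethnicities": 2,
--     "Time zones": 1,
-- }
--
-- HIGH_RISK_DATA = {
--     "Passwords",
--     "Password hints",
--     "Credit cards",
--     "Bank account numbers",
--     "Social security numbers",
--     "Security questions and answers",
--     "Auth tokens",
--     "Private messages",
-- }
--
-- MEDIUM_RISK_DATA = {
--     "Email addresses",
--     "Phone numbers",
--     "Usernames",
--     "Names",
--     "Dates of birth",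
--     "Physical addresses",
--     "IP addresses",
-- }
--
-- def _score_breach(data_classes: list[str]) -> tuple[int, str]:
--     """Return (score, severity_label) for a single breach."""
--     score = sum(DATA_WEIGHTS.get(dc, 1) for dc in data_classes)
--     score = min(score, 100)
--
--     has_high = any(dc in HIGH_RISK_DATA for dc in data_classes)
--     has_medium = any(dc in MEDIUM_RISK_DATA for dc in data_classes)
--
--     if has_high or score >= 50:
--         severity = "HIGH"
--     elif has_medium or score >= 20:
--         severity = "MEDIUM"
--     else:
--         severity = "LOW"
--
--     return score, severity
-- ===== SOURCE B (Python) =====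
-- DATA_WEIGHTS: dict[str, int] = {
--     "Passwords": 30,
--     "Password hints": 20,
--     "Credit cards": 35,
--     "Bank account numbers": 35,
--     "Social security numbers": 35,
--     "Private messages": 25,
--     "Security questions and answers": 22,
--     "Auth tokens": 28,
--     "Email addresses": 10,
--     "Phone numbers": 12,
--     "Usernames": 8,
--     "Names": 6,
--     "Dates of birth": 14,
--     "Physical addresses": 12,
--     "IP addresses": 8,
--     "Geographic locations": 3,
--     "Genders": 2,
--     "Website activity": 4,
--     "Device information": 4,
--     "Employers": 2,
--     "Education levels": 2,
--     "Ethnicities": 2,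
--     "Time zones": 1,
-- }
--
-- # No risk sets needed: the weight table already encodes the tiers.
-- # HIGH_RISK_DATA is exactly the keys with weight >= 20, MEDIUM_RISK_DATA exactly
-- # those with weight 6..14; everything else (including unknown classes, weight 1)
-- # is below 6.  So one dict lookup per item yields both the score contribution
-- # and the risk tier, and the severity is the max tier indexed into a label table.
--
-- LABELS = ("LOW", "MEDIUM", "HIGH")
--
--
-- def _score_breach(data_classes: list[str]) -> tuple[int, str]:
--     """Return (score, severity_label) for a single breach."""
--     score = 0
--     level = 0
--     for dc in data_classes:
--         w = DATA_WEIGHTS.get(dc, 1)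
--         score += w
--         level = max(level, 2 if w >= 20 else (1 if w >= 6 else 0))
--     score = min(score, 100)
--     level = max(level, 2 if score >= 50 else (1 if score >= 20 else 0))
--     return score, LABELS[level]
-- ===== Notes on version B (the rewrite author's own statement) =====
-- stated objective: alternative
-- what changed: Dropped the HIGH_RISK_DATA/MEDIUM_RISK_DATA sets and the two any() membership scans entirely: the weight table already encodes the risk tiers (weight >= 20 is exactly the high-risk set, 6..14 exactly the medium-risk set, everything else incl. unknown below 6), so one dict lookup per item feeds both a running score and a running max tier, and the severity comes from indexing a label table with the max of the item tier and the score tier instead of the if-cascade.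
import Mathlib
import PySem

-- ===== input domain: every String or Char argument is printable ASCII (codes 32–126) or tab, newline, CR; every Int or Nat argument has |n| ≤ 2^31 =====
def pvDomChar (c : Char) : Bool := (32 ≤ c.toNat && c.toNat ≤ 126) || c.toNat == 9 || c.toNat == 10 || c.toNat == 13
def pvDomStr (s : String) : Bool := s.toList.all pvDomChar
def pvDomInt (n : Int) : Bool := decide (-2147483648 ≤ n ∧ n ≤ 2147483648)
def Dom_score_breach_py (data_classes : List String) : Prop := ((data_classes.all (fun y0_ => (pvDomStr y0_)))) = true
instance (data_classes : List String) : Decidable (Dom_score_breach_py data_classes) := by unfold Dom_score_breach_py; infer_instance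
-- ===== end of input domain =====

-- B drops the two risk sets and their any() scans: the weight table already encodes the
-- tiers (weight ≥ 20 = high set, 6..14 = medium set, else low), so one lookup per item
-- feeds a running score and a running max tier, and the label is picked by table index.

-- ===== PORT A =====
-- module-level constants of A
def pvDataWeights : PySem.Dict String Int :=
  PySem.Dict.ofList [("Passwords", 30), ("Password hints", 20), ("Credit cards", 35),
   ("Bank account numbers", 35), ("Social security numbers", 35),
   ("Private messages", 25), ("Security questions and answers", 22),
   ("Auth tokens", 28), ("Email addresses", 10), ("Phone numbers", 12),
   ("Usernames", 8), ("Names", 6), ("Dates of birth", 14),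
   ("Physical addresses", 12), ("IP addresses", 8), ("Geographic locations", 3),
   ("Genders", 2), ("Website activity", 4), ("Device information", 4),
   ("Employers", 2), ("Education levels", 2), ("Ethnicities", 2), ("Time zones", 1)]

def pvHighRisk : PySem.Set String :=
  PySem.Set.ofList ["Passwords", "Password hints", "Credit cards",
    "Bank account numbers", "Social security numbers",
    "Security questions and answers", "Auth tokens", "Private messages"]

def pvMediumRisk : PySem.Set String :=
  PySem.Set.ofList ["Email addresses", "Phone numbers", "Usernames", "Names",
    "Dates of birth", "Physical addresses", "IP addresses"]

def score_breach_py (data_classes : List String) : Int × String :=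
  let score := (data_classes.map (fun dc => pvDataWeights.getD dc 1)).sum
  let score := min score 100
  let has_high := data_classes.any (fun dc => pvHighRisk.contains dc)
  let has_medium := data_classes.any (fun dc => pvMediumRisk.contains dc)
  let severity :=
    if has_high || score ≥ 50 then "HIGH"
    else if has_medium || score ≥ 20 then "MEDIUM"
    else "LOW"
  (score, severity)

-- ===== PORT B =====
-- LABELS = ("LOW", "MEDIUM", "HIGH")
def pvLabels : List String := ["LOW", "MEDIUM", "HIGH"]

-- `2 if w >= 20 else (1 if w >= 6 else 0)`
def pvTier (w : Int) : Nat := if 20 ≤ w then 2 else if 6 ≤ w then 1 else 0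

def score_breach_py_alt (data_classes : List String) : Int × String :=
  let st := data_classes.foldl
    (fun (st : Int × Nat) dc =>
      let w := pvDataWeights.getD dc 1
      (st.1 + w, max st.2 (pvTier w)))
    (0, 0)
  let score := min st.1 100
  let level := max st.2 (if 50 ≤ score then 2 else if 20 ≤ score then 1 else 0)
  -- LABELS[level]: level ≤ 2 always, so plain getD is exact (IndexError unreachable)
  (score, pvLabels.getD level "")

-- ===== PRECONDITION & SPEC =====
def Spec_score_breach_py (data_classes : List String) (out : Int × String) : Prop := out = score_breach_py_alt data_classes
instance (data_classes : List String) (out : Int × String) : Decidable (Spec_score_breach_py data_classes out) := by unfold Spec_score_breach_py; infer_instance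

-- ===== CLAIM (what is proved, stated in full; the proofs are below) =====
def Claim_equal_score_breach_py : Prop := ∀ (data_classes : List String), Dom_score_breach_py data_classes → Spec_score_breach_py data_classes (score_breach_py data_classes)

-- ===== LEMMAS AND PROOFS =====

-- The weight table encodes the risk sets: a string is in HIGH_RISK_DATA iff its weight
-- is ≥ 20, in MEDIUM_RISK_DATA iff its weight is in 6..19 (unknown strings weigh 1).
theorem pv_weight_spec (dc : String) :
    pvHighRisk.contains dc = decide (20 ≤ pvDataWeights.getD dc 1) ∧
    pvMediumRisk.contains dc = decide (6 ≤ pvDataWeights.getD dc 1 ∧ pvDataWeights.getD dc 1 < 20) := by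
  by_cases h : dc ∈ pvDataWeights.keys
  · fin_cases h <;> exact ⟨by decide, by decide⟩
  · have hg : pvDataWeights.get? dc = none :=
      (PySem.Dict.get?_eq_none_iff_not_mem_keys pvDataWeights dc).mpr h
    have hH : pvHighRisk.contains dc = false := by
      simp only [PySem.Set.contains, List.contains_eq_mem, decide_eq_false_iff_not]
      intro hm
      exact h (by fin_cases hm <;> decide)
    have hM : pvMediumRisk.contains dc = false := by
      simp only [PySem.Set.contains, List.contains_eq_mem, decide_eq_false_iff_not]
      intro hm
      exact h (by fin_cases hm <;> decide)
    refine ⟨?_, ?_⟩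
    · rw [hH]; simp [PySem.Dict.getD, hg]
    · rw [hM]; simp [PySem.Dict.getD, hg]

theorem pv_high_eq (dc : String) :
    pvHighRisk.contains dc = (pvTier (pvDataWeights.getD dc 1) == 2) := by
  rw [(pv_weight_spec dc).1]
  unfold pvTier
  split_ifs <;> simp_all

theorem pv_med_eq (dc : String) :
    pvMediumRisk.contains dc = (pvTier (pvDataWeights.getD dc 1) == 1) := by
  rw [(pv_weight_spec dc).2]
  unfold pvTier
  split_ifs <;> simp_all

theorem pv_tier_le (w : Int) : pvTier w ≤ 2 := by
  unfold pvTier; split_ifs <;> omega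

theorem pv_max_step (l t : Nat) (ht : t ≤ 2) (a b : Bool) :
    max (max l t) (if a then 2 else if b then 1 else 0)
      = max l (if (t == 2 || a) then 2 else if (t == 1 || b) then 1 else 0) := by
  interval_cases t <;> cases a <;> cases b <;> simp

-- B's fold computes the total weight and the max tier, merged with A's three passes.
theorem pv_fold (xs : List String) (s : Int) (l : Nat) :
    xs.foldl
      (fun (st : Int × Nat) dc =>
        let w := pvDataWeights.getD dc 1
        (st.1 + w, max st.2 (pvTier w)))
      (s, l)
    = (s + (xs.map (fun dc => pvDataWeights.getD dc 1)).sum,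
       max l (if xs.any (fun dc => pvTier (pvDataWeights.getD dc 1) == 2) then 2
              else if xs.any (fun dc => pvTier (pvDataWeights.getD dc 1) == 1) then 1 else 0)) := by
  induction xs generalizing s l with
  | nil => simp
  | cons x xs ih =>
    rw [List.foldl_cons, ih]
    simp only [List.map_cons, List.sum_cons, List.any_cons, Prod.mk.injEq]
    exact ⟨by ring, pv_max_step l _ (pv_tier_le _) _ _⟩

theorem pv_label (a b : Bool) (sc : Int) :
    (if (a || decide (sc ≥ 50)) then "HIGH"
     else if (b || decide (sc ≥ 20)) then "MEDIUM" else "LOW")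
      = pvLabels.getD
          (max (if a then 2 else if b then 1 else 0)
               (if 50 ≤ sc then 2 else if 20 ≤ sc then 1 else 0)) "" := by
  cases a <;> cases b <;>
    by_cases h50 : (50 : Int) ≤ sc <;> by_cases h20 : (20 : Int) ≤ sc <;>
    simp only [ge_iff_le, h50, h20, decide_true, decide_false, Bool.false_or, Bool.true_or,
      if_true, if_false] <;> rfl

-- ===== VERDICT (by name: the statement is the Claim_ definition above) =====
theorem score_breach_py_spec : Claim_equal_score_breach_py := by
  intro data_classes _
  unfold Spec_score_breach_py score_breach_py score_breach_py_alt
  rw [pv_fold]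
  simp only [pv_high_eq, pv_med_eq, zero_add, Nat.zero_max]
  exact Prod.ext rfl (pv_label _ _ _)
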